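-- pv_equiv track=rewrite | github.com/Arshdeep133/Eight_Puzzle_problem | code/algorithms/pdb_creation.py | disjointset1
-- ===== SOURCE A (Python) =====
-- def disjointset1(n):
--     #n n n-1 disjoint set
--     #The blank tile (0) is not part of the group.
--     #During reverse BFS the blank tile is dynamically allowed to occupy any position in the puzzle
--     #So, any tiles marked -1 can be used as blank tiles
--     group_tile = [[[-1 for _ in range(n)] for _ in range(n)] for _ in range(n)]
--     empty = None
--     state = [[(i * n + j + 1) % (n * n) for j in range(n)] for i in range(n)]
--     for i in range(n):
--         for row in range(n):
--             for col in range(n):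
--                 if row == i and state[row][col] != 0:
--                     group_tile[i][row][col] = state[row][col]
--     return group_tile
-- ===== SOURCE B (Python) =====
-- def disjointset1(n):
--     # Build each layer directly: only row i of layer i carries tile numbers,
--     # every other row is just [-1]*n, so the redundant row scan disappears.
--     full = n * n
--     layers = []
--     for i in range(n):
--         layer = []
--         for r in range(n):
--             if r == i:
--                 row = []
--                 for c in range(n):
--                     v = (i * n + c + 1) % full
--                     row.append(v if v != 0 else -1)
--                 layer.append(row)
--             else:
--                 layer.append([-1] * n)
--         layers.append(layer)
--     return layers
-- ===== Notes on version B (the rewrite author's own statement) =====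
-- stated objective: alternative
-- what changed: B builds each layer directly in one pass (row i of layer i gets the tile numbers, every other row is [-1]*n), instead of A's allocate-all--1, build a full state matrix, then triple-loop scan that tests row==i on every cell.
import Mathlib
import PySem

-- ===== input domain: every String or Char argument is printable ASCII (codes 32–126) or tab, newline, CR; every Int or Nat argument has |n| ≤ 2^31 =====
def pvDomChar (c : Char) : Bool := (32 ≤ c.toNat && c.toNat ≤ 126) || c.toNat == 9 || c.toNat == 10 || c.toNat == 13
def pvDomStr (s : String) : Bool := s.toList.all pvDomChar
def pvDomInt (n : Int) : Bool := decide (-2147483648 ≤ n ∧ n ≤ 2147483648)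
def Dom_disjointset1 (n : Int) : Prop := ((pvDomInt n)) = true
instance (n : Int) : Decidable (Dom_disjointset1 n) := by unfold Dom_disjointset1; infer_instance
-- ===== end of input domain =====

-- B builds each layer directly in one pass (row i of layer i gets the tile numbers, the other
-- rows are [-1]*n) instead of A's allocate-all--1 + state matrix + triple-loop scan.

-- ===== PORT A =====
-- indices i/row/col come from range(n), hence are nonnegative and in range, so
-- List.modify/List.set at .toNat positions is exact for the Python item assignment
-- group_tile[i][row][col] = v; state[row][col] is PySem.List.pyGetD (in range, so exact).
def disjointset1 (n : Int) : List (List (List Int)) :=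
  let group_tile : List (List (List Int)) :=
    (PySem.List.pyRange 0 n 1).map (fun _ =>
      (PySem.List.pyRange 0 n 1).map (fun _ =>
        (PySem.List.pyRange 0 n 1).map (fun _ => (-1 : Int))))
  let state : List (List Int) :=
    (PySem.List.pyRange 0 n 1).map (fun i =>
      (PySem.List.pyRange 0 n 1).map (fun j => PySem.Int.mod (i * n + j + 1) (n * n)))
  (PySem.List.pyRange 0 n 1).foldl (fun gt i =>
    (PySem.List.pyRange 0 n 1).foldl (fun gt row =>
      (PySem.List.pyRange 0 n 1).foldl (fun gt col =>
        if row = i ∧ PySem.List.pyGetD (PySem.List.pyGetD state row []) col 0 ≠ 0 then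
          gt.modify i.toNat (fun p => p.modify row.toNat (fun q =>
            q.set col.toNat (PySem.List.pyGetD (PySem.List.pyGetD state row []) col 0)))
        else gt) gt) gt) group_tile

-- ===== PORT B =====
def disjointset1_alt (n : Int) : List (List (List Int)) :=
  let full := n * n
  (PySem.List.pyRange 0 n 1).map (fun i =>
    (PySem.List.pyRange 0 n 1).map (fun r =>
      if r = i then
        (PySem.List.pyRange 0 n 1).map (fun c =>
          let v := PySem.Int.mod (i * n + c + 1) full
          if v ≠ 0 then v else -1)
      else
        List.replicate n.toNat (-1)))

-- ===== PRECONDITION & SPEC =====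
def Spec_disjointset1 (n : Int) (out : List (List (List Int))) : Prop := out = disjointset1_alt n
instance (n : Int) (out : List (List (List Int))) : Decidable (Spec_disjointset1 n out) := by unfold Spec_disjointset1; infer_instance

-- ===== CLAIM (what is proved, stated in full; the proofs are below) =====
def Claim_equal_disjointset1 : Prop := ∀ (n : Int), Dom_disjointset1 n → Spec_disjointset1 n (disjointset1 n)

-- ===== LEMMAS AND PROOFS =====

-- the value of state[i][c] and the entry both programs end up putting at [i][i][c]
def pvVal (n : Int) (i c : Nat) : Int := PySem.Int.mod ((i : Int) * n + (c : Int) + 1) (n * n)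
def pvEntry (n : Int) (i c : Nat) : Int := if pvVal n i c ≠ 0 then pvVal n i c else -1
def pvRowT (n : Int) (m i : Nat) : List Int := (List.range m).map (pvEntry n i)
def pvLayerT (n : Int) (m i : Nat) : List (List Int) :=
  (List.range m).map (fun r => if r = i then pvRowT n m i else List.replicate m (-1))

theorem pv_hrange (m : Nat) : PySem.List.pyRange 0 (m : Int) 1 = (List.range m).map (fun (k : Nat) => (k : Int)) := by
  rw [PySem.List.pyRange_one]
  simp only [sub_zero, Int.toNat_natCast, zero_add]

theorem pv_modify_id {α : Type} (l : List α) (i : Nat) : l.modify i id = l := by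
  apply List.ext_getElem (by simp)
  intro j h1 h2
  simp

theorem pv_modify_modify {α : Type} (l : List α) (i : Nat) (f h : α → α) :
    (l.modify i f).modify i h = l.modify i (fun x => h (f x)) := by
  apply List.ext_getElem (by simp)
  intro j h1 h2
  simp only [List.getElem_modify]
  split <;> rfl

theorem pv_foldl_modify {α : Type} (l : List Nat) (P : Nat → Prop) [DecidablePred P]
    (i : Nat) (step : α → Nat → α) : ∀ (g : List α),
    l.foldl (fun g c => if P c then g.modify i (fun p => step p c) else g) g
      = g.modify i (fun p => l.foldl (fun p c => if P c then step p c else p) p) := by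
  induction l with
  | nil => intro g; exact (pv_modify_id g i).symm
  | cons c t ih =>
    intro g
    by_cases hc : P c
    · simp only [List.foldl_cons, if_pos hc, ih, pv_modify_modify]
    · simp only [List.foldl_cons, if_neg hc, ih]

theorem pv_foldl_ite_false {γ : Type} (Q : Nat → Prop) [DecidablePred Q]
    (u : γ → Nat → γ) (hQ : ∀ c, ¬ Q c) : ∀ (l : List Nat) (g : γ),
    l.foldl (fun g c => if Q c then u g c else g) g = g := by
  intro l
  induction l with
  | nil => intro g; simp
  | cons c t ih => intro g; simp [if_neg (hQ c), ih]

theorem pv_foldl_ite_not_mem {γ : Type} (F : γ → γ) (i : Nat) :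
    ∀ (l : List Nat), i ∉ l → ∀ (g : γ),
    l.foldl (fun g r => if r = i then F g else g) g = g := by
  intro l
  induction l with
  | nil => intro _ g; simp
  | cons c t ih =>
    intro h g
    simp only [List.mem_cons, not_or] at h
    simp only [List.foldl_cons, if_neg (Ne.symm h.1)]
    exact ih h.2 g

theorem pv_foldl_ite_single {γ : Type} (F : γ → γ) (m i : Nat) (hi : i < m) (g : γ) :
    (List.range m).foldl (fun g r => if r = i then F g else g) g = F g := by
  induction m generalizing g with
  | zero => omega
  | succ m ih =>
    rw [List.range_succ, List.foldl_append]
    by_cases h : i < m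
    · rw [ih h]
      simp [if_neg (by omega : ¬ m = i)]
    · have hmi : i = m := by omega
      subst hmi
      rw [pv_foldl_ite_not_mem F i (List.range i) (by simp)]
      simp

theorem pv_modify_map_range {α : Type} (f : Nat → α) (h : α → α) (k m : Nat) (_hk : k < m) :
    ((List.range m).map f).modify k h
      = (List.range m).map (fun i => if i = k then h (f i) else f i) := by
  apply List.ext_getElem (by simp)
  intro j h1 h2
  simp only [List.length_modify, List.length_map, List.length_range] at h1
  simp only [List.getElem_modify, List.getElem_map, List.getElem_range]
  by_cases e : k = j
  · subst e; simp
  · rw [if_neg e, if_neg (Ne.symm e)]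

-- writing the nonzero entries into an all-(-1) row yields pvRowT plus the untouched suffix
theorem pv_row_fold (n : Int) (m : Nat) (i : Nat) : ∀ (k : Nat), k ≤ m →
    (List.range k).foldl (fun q c => if pvVal n i c ≠ 0 then q.set c (pvVal n i c) else q)
        (List.replicate m (-1))
      = (List.range k).map (pvEntry n i) ++ List.replicate (m - k) (-1) := by
  intro k
  induction k with
  | zero => intro _; simp
  | succ k ih =>
    intro hk
    have hk' : k ≤ m := by omega
    rw [List.range_succ, List.foldl_append, ih hk', List.foldl_cons, List.foldl_nil,
        List.map_append]
    have hrep : List.replicate (m - k) (-1 : Int) = -1 :: List.replicate (m - (k + 1)) (-1) := by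
      have h1 : m - k = (m - (k + 1)) + 1 := by omega
      rw [h1, List.replicate_succ]
    have hlen : (List.map (pvEntry n i) (List.range k)).length = k := by simp
    by_cases hv : pvVal n i k = 0
    · rw [if_neg (not_not_intro hv), hrep]
      simp [pvEntry, hv]
    · rw [if_pos hv, hrep, List.set_append_right _ _ (by omega), hlen]
      simp [pvEntry, hv]

-- folding "modify layer i" over range k starting from identical layers
theorem pv_outer (m : Nat) (L0 : List (List Int)) (W : Nat → List (List Int) → List (List Int)) :
    ∀ (k : Nat), k ≤ m →
    (List.range k).foldl (fun g i => g.modify i (W i)) ((List.range m).map (fun _ => L0))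
      = (List.range m).map (fun i => if i < k then W i L0 else L0) := by
  intro k
  induction k with
  | zero => intro _; simp
  | succ k ih =>
    intro hk
    have hk' : k ≤ m := by omega
    rw [List.range_succ, List.foldl_append, ih hk', List.foldl_cons, List.foldl_nil,
        pv_modify_map_range _ _ k m (by omega)]
    apply List.map_congr_left
    intro i hi
    simp only [List.mem_range] at hi
    by_cases e : i = k
    · subst e; simp
    · simp only [if_neg e]
      split_ifs <;> first | rfl | omega

theorem pv_A_eq (m : Nat) : disjointset1 (m : Int) = (List.range m).map (pvLayerT (m : Int) m) := by
  have hstate : ∀ (r c : Nat), r < m → c < m →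
      PySem.List.pyGetD (PySem.List.pyGetD
        ((List.range m).map (fun (k : Nat) => (List.range m).map (fun (j : Nat) =>
          PySem.Int.mod ((k : Int) * (m : Int) + (j : Int) + 1) ((m : Int) * (m : Int))))) (r : Int) [])
        (c : Int) 0 = pvVal (m : Int) r c := by
    intro r c hr hc
    rw [PySem.List.pyGetD_natCast, PySem.List.pyGetD_natCast,
        PySem.List.getD_map_range _ m r _ hr, PySem.List.getD_map_range _ m c _ hc]
    rfl
  unfold disjointset1
  simp only [pv_hrange, List.foldl_map, List.map_map, Function.comp_def, Int.toNat_natCast,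
    Nat.cast_inj]
  rw [PySem.List.foldl_congr_mem _ _
    (fun gt (i : Nat) => gt.modify i (fun p => p.modify i (fun q =>
      (List.range m).foldl (fun q c =>
        if pvVal (m : Int) i c ≠ 0 then q.set c (pvVal (m : Int) i c) else q) q))) _ ?houter]
  case houter =>
    intro gt i hi
    simp only [List.mem_range] at hi
    rw [PySem.List.foldl_congr_mem _ _
      (fun gt (row : Nat) => if row = i then
        gt.modify i (fun p => p.modify i (fun q =>
          (List.range m).foldl (fun q c =>
            if pvVal (m : Int) i c ≠ 0 then q.set c (pvVal (m : Int) i c) else q) q))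
      else gt) gt ?hmid]
    · beta_reduce
      exact pv_foldl_ite_single _ m i hi gt
    case hmid =>
      intro gt2 row hrow
      simp only [List.mem_range] at hrow
      beta_reduce
      by_cases hri : row = i
      · subst hri
        rw [if_pos rfl]
        rw [PySem.List.foldl_congr_mem _ _
          (fun g (c : Nat) => if pvVal (m : Int) row c ≠ 0 then
            g.modify row (fun p => p.modify row (fun q => q.set c (pvVal (m : Int) row c)))
          else g) gt2 ?hcol]
        · rw [pv_foldl_modify (List.range m) (fun c => pvVal (m : Int) row c ≠ 0) row
            (fun p c => p.modify row (fun q => q.set c (pvVal (m : Int) row c))) gt2]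
          refine congrArg _ ?_
          funext p
          rw [pv_foldl_modify (List.range m) (fun c => pvVal (m : Int) row c ≠ 0) row
            (fun q c => q.set c (pvVal (m : Int) row c)) p]
        case hcol =>
          intro g c hc
          simp only [List.mem_range] at hc
          rw [hstate row c hrow hc]
          simp only [true_and]
      · rw [if_neg hri]
        exact pv_foldl_ite_false _ _ (fun c hQ => hri hQ.1) (List.range m) gt2
  rw [pv_outer m _ _ m le_rfl]
  apply List.map_congr_left
  intro i hi
  simp only [List.mem_range] at hi
  rw [if_pos hi, pv_modify_map_range _ _ i m hi]
  unfold pvLayerT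
  apply List.map_congr_left
  intro r hr
  by_cases hri : r = i
  · subst hri
    rw [if_pos rfl, if_pos rfl]
    have hR : (List.range m).map (fun (_ : Nat) => (-1 : Int)) = List.replicate m (-1) := by
      rw [List.map_const', List.length_range]
    rw [hR]
    have := pv_row_fold (m : Int) m r m le_rfl
    simp only [Nat.sub_self, List.replicate_zero, List.append_nil] at this
    rw [this]
    rfl
  · rw [if_neg hri, if_neg hri, List.map_const', List.length_range]

theorem pv_B_eq (m : Nat) : disjointset1_alt (m : Int) = (List.range m).map (pvLayerT (m : Int) m) := by
  unfold disjointset1_alt pvLayerT pvRowT pvEntry pvVal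
  simp only [pv_hrange, List.map_map, Function.comp_def, Int.toNat_natCast, Nat.cast_inj]

-- ===== VERDICT (by name: the statement is the Claim_ definition above) =====
theorem disjointset1_spec : Claim_equal_disjointset1 := by
  intro n _
  unfold Spec_disjointset1
  by_cases hn : n ≤ 0
  · simp [disjointset1, disjointset1_alt, PySem.List.pyRange_one_eq_nil hn]
  · have hm : n = ((n.toNat : Nat) : Int) := by omega
    rw [hm, pv_A_eq, pv_B_eq]
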